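-- pv_equiv track=rewrite | github.com/biostochastics/CodeConCat | codeconcat/parser/language_parsers/enhanced_rust_parser.py | _find_opening_brace
-- ===== SOURCE A (Python) =====
-- def _find_opening_brace(line: str, open_char: str = "{") -> tuple[int, int]:
--     """
--     Find the opening character position in a line.
--
--     Args:
--         line: The line to search.
--         open_char: The opening character to find.
--
--     Returns:
--         Tuple of (column_position, nesting_level). Returns (-1, 0) if not found.
--     """
--     in_raw_string = False
--     for col, char in enumerate(line):
--         # Handle raw strings in Rust (r"...")
--         if char == "r" and col + 1 < len(line) and line[col + 1] == '"':
--             in_raw_string = True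
--             continue
--
--         # Found opening character outside of raw string
--         if char == open_char and not in_raw_string:
--             return (col, 1)
--
--     return (-1, 0)
-- ===== SOURCE B (Python) =====
-- def _find_opening_brace(line: str, open_char: str = "{") -> tuple[int, int]:
--     # A compares open_char against single characters, so a non-single-char
--     # open_char can never match.
--     if len(open_char) != 1:
--         return (-1, 0)
--     rpos = line.find('r"')
--     opos = line.find(open_char)
--     if opos != -1 and (rpos == -1 or opos < rpos):
--         return (opos, 1)
--     return (-1, 0)
-- ===== Notes on version B (the rewrite author's own statement) =====
-- stated objective: simpler
-- what changed: Replaced the stateful character-by-character scan carrying a never-resetting raw-string flag by two str.find passes: return the first open_char position when it lies strictly before the first raw-string start (or there is none), else (-1, 0).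
import Mathlib
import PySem

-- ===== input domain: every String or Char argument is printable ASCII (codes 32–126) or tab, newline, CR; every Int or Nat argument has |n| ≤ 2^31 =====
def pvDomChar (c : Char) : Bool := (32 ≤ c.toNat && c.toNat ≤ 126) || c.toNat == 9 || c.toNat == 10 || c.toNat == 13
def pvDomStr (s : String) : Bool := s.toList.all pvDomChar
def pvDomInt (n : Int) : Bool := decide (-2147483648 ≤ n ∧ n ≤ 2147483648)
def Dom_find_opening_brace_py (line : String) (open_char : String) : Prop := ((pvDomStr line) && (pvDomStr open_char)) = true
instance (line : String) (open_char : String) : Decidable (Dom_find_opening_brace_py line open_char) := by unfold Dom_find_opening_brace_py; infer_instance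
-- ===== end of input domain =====

-- B replaces A's stateful scan (a raw-string flag that never resets) by two find passes; objective: simpler.

-- ===== PORT A =====
-- A's loop over enumerate(line) with the in_raw_string flag.  The Python check
-- `col + 1 < len(line) and line[col + 1] == '"'` is exactly `rest.head? = some '"'`
-- on the suffix starting after the current character.
def pvALoop (open_char : String) : List Char → Nat → Bool → Int × Int
  | [], _, _ => (-1, 0)
  | c :: rest, col, in_raw =>
    if c = 'r' ∧ rest.head? = some '"' then
      pvALoop open_char rest (col + 1) true
    else if String.ofList [c] = open_char ∧ in_raw = false then
      ((col : Int), 1)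
    else
      pvALoop open_char rest (col + 1) in_raw

def find_opening_brace_py (line : String) (open_char : String) : Int × Int :=
  pvALoop open_char line.toList 0 false

-- ===== PORT B =====
def find_opening_brace_py_alt (line : String) (open_char : String) : Int × Int :=
  if PySem.Str.len open_char ≠ 1 then (-1, 0)
  else
    let rpos := PySem.Str.find line "r\""
    let opos := PySem.Str.find line open_char
    if opos ≠ -1 ∧ (rpos = -1 ∨ opos < rpos) then (opos, 1) else (-1, 0)

-- ===== PRECONDITION & SPEC =====
def Spec_find_opening_brace_py (line : String) (open_char : String) (out : Int × Int) : Prop := out = find_opening_brace_py_alt line open_char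
instance (line : String) (open_char : String) (out : Int × Int) : Decidable (Spec_find_opening_brace_py line open_char out) := by unfold Spec_find_opening_brace_py; infer_instance

-- ===== CLAIM (what is proved, stated in full; the proofs are below) =====
def Claim_equal_find_opening_brace_py : Prop := ∀ (line : String) (open_char : String), Dom_find_opening_brace_py line open_char → Spec_find_opening_brace_py line open_char (find_opening_brace_py line open_char)

-- ===== LEMMAS AND PROOFS =====

-- Once the raw-string flag is set it never resets, so the loop never returns a position.
lemma pvALoop_true (open_char : String) (cs : List Char) (col : Nat) :
    pvALoop open_char cs col true = (-1, 0) := by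
  induction cs generalizing col with
  | nil => rfl
  | cons c rest ih =>
    simp only [pvALoop]
    split
    · exact ih _
    · simp [ih]

-- If open_char is not a single character, the comparison never fires.
lemma pvALoop_no_match (open_char : String) (h : ∀ c : Char, String.ofList [c] ≠ open_char)
    (cs : List Char) (col : Nat) (b : Bool) :
    pvALoop open_char cs col b = (-1, 0) := by
  induction cs generalizing col b with
  | nil => rfl
  | cons c rest ih =>
    simp only [pvALoop]
    split
    · exact ih _ _
    · rw [if_neg (by simp [h c]), ih]

-- find points at i exactly when there is an occurrence at i and none before.
lemma find_eq_of (s sub : List Char) (i : Nat) (h1 : sub <+: s.drop i)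
    (h2 : ∀ j < i, ¬ sub <+: s.drop j) : PySem.Chars.find s sub = (i : Int) := by
  have hin : PySem.Chars.isIn sub s = true :=
    (PySem.Chars.exists_prefix_drop_iff_isIn sub s).1 ⟨i, h1⟩
  have hpos : 0 ≤ PySem.Chars.find s sub :=
    (PySem.Chars.find_nonneg_iff s sub).2 ((PySem.Chars.isIn_iff_infix sub s).1 hin)
  obtain ⟨hp, hmin⟩ := PySem.Chars.find_spec hpos
  rcases lt_trichotomy (PySem.Chars.find s sub).toNat i with hlt | heq | hgt
  · exact absurd hp (h2 _ hlt)
  · omega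
  · exact absurd h1 (hmin i hgt)

lemma find_cons_shift (c : Char) (rest sub : List Char) (h : ¬ sub <+: c :: rest) :
    PySem.Chars.find (c :: rest) sub =
      if PySem.Chars.find rest sub = -1 then -1 else PySem.Chars.find rest sub + 1 := by
  by_cases hr : PySem.Chars.find rest sub = -1
  · rw [if_pos hr]
    rw [PySem.Chars.find_eq_neg_one_iff] at hr ⊢
    intro hin
    rcases List.infix_cons_iff.mp hin with hp | hi
    · exact h hp
    · exact hr hi
  · rw [if_neg hr]
    have hpos : 0 ≤ PySem.Chars.find rest sub := by
      have := PySem.Chars.neg_one_le_find rest sub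
      omega
    obtain ⟨hp, hmin⟩ := PySem.Chars.find_spec hpos
    have heq : PySem.Chars.find (c :: rest) sub = ((PySem.Chars.find rest sub).toNat + 1 : Nat) := by
      apply find_eq_of
      · simpa using hp
      · intro j hj
        match j with
        | 0 => simpa using h
        | j + 1 =>
          simp only [List.drop_succ_cons]
          exact hmin j (by omega)
    rw [heq]; push_cast; omega

-- Main characterisation of A's loop when open_char is the single character o.
lemma pvALoop_eq (open_char : String) (o : Char) (hoc : open_char.toList = [o])
    (cs : List Char) (col : Nat) :
    pvALoop open_char cs col false =
      (if PySem.Chars.find cs [o] ≠ -1 ∧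
          (PySem.Chars.find cs ['r', '"'] = -1 ∨
            PySem.Chars.find cs [o] < PySem.Chars.find cs ['r', '"'])
        then ((col : Int) + PySem.Chars.find cs [o], 1) else (-1, 0)) := by
  have hocc : ∀ c : Char, (String.ofList [c] = open_char) ↔ c = o := by
    intro c
    constructor
    · intro h
      have h2 := congrArg String.toList h
      rw [String.toList_ofList, hoc] at h2
      simpa using h2
    · rintro rfl
      rw [← hoc, String.ofList_toList]
  induction cs generalizing col with
  | nil =>
    have h : PySem.Chars.find [] [o] = -1 := by
      rw [PySem.Chars.find_eq_neg_one_iff]; simp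
    simp [pvALoop, h]
  | cons c rest ih =>
    simp only [pvALoop]
    by_cases hrw : c = 'r' ∧ rest.head? = some '"'
    · rw [if_pos hrw, pvALoop_true]
      have hr0 : PySem.Chars.find (c :: rest) ['r', '"'] = 0 := by
        apply find_eq_of _ _ 0
        · obtain ⟨h1, h2⟩ := hrw
          cases rest with
          | nil => simp at h2
          | cons d tl =>
            simp at h2
            simp [h1, h2, List.prefix_iff_eq_take]
        · intro j hj; omega
      rw [hr0]
      have hge : -1 ≤ PySem.Chars.find (c :: rest) [o] := PySem.Chars.neg_one_le_find _ _
      have : ¬ (PySem.Chars.find (c :: rest) [o] ≠ -1 ∧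
          ((0 : Int) = -1 ∨ PySem.Chars.find (c :: rest) [o] < 0)) := by
        rintro ⟨h1, h2 | h2⟩ <;> omega
      rw [if_neg this]
    · rw [if_neg hrw]
      have hrshift : PySem.Chars.find (c :: rest) ['r', '"'] =
          if PySem.Chars.find rest ['r', '"'] = -1 then -1
          else PySem.Chars.find rest ['r', '"'] + 1 := by
        apply find_cons_shift
        intro hpre
        apply hrw
        cases rest with
        | nil => simp [List.prefix_iff_eq_take] at hpre
        | cons d tl =>
          rw [List.prefix_iff_eq_take] at hpre
          simp at hpre
          exact ⟨hpre.1.symm, by simp [hpre.2.symm]⟩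
      by_cases hco : c = o
      · rw [if_pos (by simp [hocc, hco])]
        have ho0 : PySem.Chars.find (c :: rest) [o] = 0 := by
          apply find_eq_of _ _ 0
          · simp [List.prefix_iff_eq_take, hco]
          · intro j hj; omega
        rw [ho0]
        have hcond : ((0 : Int) ≠ -1 ∧
            (PySem.Chars.find (c :: rest) ['r', '"'] = -1 ∨
              (0 : Int) < PySem.Chars.find (c :: rest) ['r', '"'])) := by
          refine ⟨by omega, ?_⟩
          rw [hrshift]
          by_cases h : PySem.Chars.find rest ['r', '"'] = -1
          · left; simp [h]
          · right
            have := PySem.Chars.neg_one_le_find rest ['r', '"']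
            rw [if_neg h]; omega
        rw [if_pos hcond]; simp
      · rw [if_neg (by simp [hocc, hco]), ih]
        have hoshift : PySem.Chars.find (c :: rest) [o] =
            if PySem.Chars.find rest [o] = -1 then -1
            else PySem.Chars.find rest [o] + 1 := by
          apply find_cons_shift
          rw [List.prefix_iff_eq_take]
          simp
          exact fun h => hco h.symm
        have hge1 := PySem.Chars.neg_one_le_find rest [o]
        have hge2 := PySem.Chars.neg_one_le_find rest ['r', '"']
        rw [hrshift, hoshift]
        by_cases h1 : PySem.Chars.find rest [o] = -1 <;>
          by_cases h2 : PySem.Chars.find rest ['r', '"'] = -1 <;>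
            simp only [h1, h2, if_false] <;>
              split_ifs <;> simp_all <;> omega

-- ===== VERDICT (by name: the statement is the Claim_ definition above) =====
theorem find_opening_brace_py_spec : Claim_equal_find_opening_brace_py := by
  intro line open_char _
  unfold Spec_find_opening_brace_py find_opening_brace_py find_opening_brace_py_alt
  by_cases hlen : PySem.Str.len open_char = 1
  · rw [if_neg (by omega)]
    have : ∃ o : Char, open_char.toList = [o] := by
      have : open_char.toList.length = 1 := by
        have := PySem.Str.len_eq open_char
        omega
      match h : open_char.toList with
      | [o] => exact ⟨o, rfl⟩
      | [] => simp [h] at this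
      | _ :: _ :: _ => simp [h] at this
    obtain ⟨o, ho⟩ := this
    rw [pvALoop_eq open_char o ho]
    simp only [PySem.Str.find_eq, ho]
    have : ("r\"" : String).toList = ['r', '"'] := by decide
    rw [this]
    split_ifs with h1 <;> simp_all
  · rw [if_pos (by omega)]
    apply pvALoop_no_match
    intro c hc
    apply hlen
    have hcl := congrArg String.toList hc
    rw [String.toList_ofList] at hcl
    rw [PySem.Str.len_eq, ← hcl]
    rfl
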